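-- pv_equiv track=rewrite | github.com/MayankShakyawal/Tresata-Assignment | tools/parser.py | parse_company
-- ===== SOURCE A (Python) =====
-- def parse_company(value, legal_list):
--     if not isinstance(value, str):
--         return value, ""
--
--     lower = value.lower().strip()
--
--     for ls in sorted(legal_list, key=lambda x: -len(x)):
--         if ls and ls in lower:
--             name = lower.replace(ls, "").strip()
--             return name, ls
--
--     return value, ""
-- ===== SOURCE B (Python) =====
-- def parse_company(value, legal_list):
--     if not isinstance(value, str):
--         return value, ""
--
--     lower = value.lower().strip()
--
--     best = None
--     for ls in legal_list:
--         if ls and (best is None or len(ls) > len(best)) and ls in lower: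
--             best = ls
--
--     if best is None:
--         return value, ""
--     return lower.replace(best, "").strip(), best
-- ===== Notes on version B (the rewrite author's own statement) =====
-- stated objective: alternative
-- what changed: Replaces the sort-by-descending-length-then-first-match scan with a single linear pass over legal_list in original order keeping the best-so-far match (strict > and the length check before the substring test preserve the stable sort's earliest-entry tie-break), avoiding the sort entirely.
import Mathlib
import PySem

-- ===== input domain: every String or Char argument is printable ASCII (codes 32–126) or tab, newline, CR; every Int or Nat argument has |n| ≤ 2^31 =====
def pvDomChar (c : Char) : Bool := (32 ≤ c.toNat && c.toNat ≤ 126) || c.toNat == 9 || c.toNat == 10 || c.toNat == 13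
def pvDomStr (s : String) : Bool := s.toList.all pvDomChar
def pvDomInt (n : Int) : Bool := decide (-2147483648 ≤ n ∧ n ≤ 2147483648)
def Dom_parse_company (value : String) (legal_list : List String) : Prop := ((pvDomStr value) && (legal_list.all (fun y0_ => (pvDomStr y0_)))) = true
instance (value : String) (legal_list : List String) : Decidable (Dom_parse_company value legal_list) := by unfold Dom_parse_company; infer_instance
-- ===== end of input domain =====

-- B replaces A's sort-by-descending-length-then-first-match with one linear pass over
-- legal_list in original order keeping the best-so-far match (no sort needed).
-- value is a String here, so A's isinstance guard is always satisfied.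

-- ===== PORT A =====
-- the for-loop with early return: scan the sorted list, return at the first match
def parseLoopA (lower value : String) : List String → String × String
  | [] => (value, "")
  | ls :: rest =>
    if ls ≠ "" ∧ PySem.Str.isIn ls lower = true then
      (PySem.Str.strip (PySem.Str.replace lower ls ""), ls)
    else parseLoopA lower value rest

def parse_company (value : String) (legal_list : List String) : String × String :=
  let lower := PySem.Str.strip (PySem.Str.lower value)
  parseLoopA lower value (PySem.List.sorted legal_list (fun x => -(PySem.Str.len x)))

-- ===== PORT B =====
-- one step of B's loop: update the best-so-far match
def bestStepB (lower : String) (best : Option String) (ls : String) : Option String :=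
  if ls ≠ "" ∧ (∀ b ∈ best, PySem.Str.len b < PySem.Str.len ls) ∧ PySem.Str.isIn ls lower = true
  then some ls else best

def parse_company_alt (value : String) (legal_list : List String) : String × String :=
  let lower := PySem.Str.strip (PySem.Str.lower value)
  match legal_list.foldl (bestStepB lower) none with
  | none => (value, "")
  | some b => (PySem.Str.strip (PySem.Str.replace lower b ""), b)

-- ===== PRECONDITION & SPEC =====
def Spec_parse_company (value : String) (legal_list : List String) (out : String × String) : Prop := out = parse_company_alt value legal_list
instance (value : String) (legal_list : List String) (out : String × String) : Decidable (Spec_parse_company value legal_list out) := by unfold Spec_parse_company; infer_instance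

-- ===== CLAIM (what is proved, stated in full; the proofs are below) =====
def Claim_equal_parse_company : Prop := ∀ (value : String) (legal_list : List String), Dom_parse_company value legal_list → Spec_parse_company value legal_list (parse_company value legal_list)

-- ===== LEMMAS AND PROOFS =====

-- the Option-valued first match of A's loop
def firstMatch (lower : String) : List String → Option String
  | [] => none
  | ls :: rest =>
    if ls ≠ "" ∧ PySem.Str.isIn ls lower = true then some ls else firstMatch lower rest

theorem parseLoopA_eq_firstMatch (lower value : String) (l : List String) :
    parseLoopA lower value l =
      match firstMatch lower l with
      | none => (value, "")
      | some b => (PySem.Str.strip (PySem.Str.replace lower b ""), b) := by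
  induction l with
  | nil => rfl
  | cons ls rest ih =>
    simp only [parseLoopA, firstMatch]
    split_ifs with h <;> simp [ih]

theorem firstMatch_mem {lower : String} {l : List String} {m : String}
    (h : firstMatch lower l = some m) : m ∈ l := by
  induction l with
  | nil => simp [firstMatch] at h
  | cons ls rest ih =>
    simp only [firstMatch] at h
    split_ifs at h with hp
    · simp [Option.some.injEq] at h; simp [h]
    · exact List.mem_cons_of_mem _ (ih h)

-- descending order by length
def descLen (l : List String) : Prop :=
  l.Pairwise (fun a b => PySem.Str.len b ≤ PySem.Str.len a)

theorem insertBy_preserves_desc (x : String) (l : List String) (h : descLen l) :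
    descLen (PySem.List.insertBy
      (fun a b => decide (-(PySem.Str.len a) < -(PySem.Str.len b))) x l) := by
  induction l with
  | nil => simp [PySem.List.insertBy, descLen]
  | cons y ys ih =>
    rcases List.pairwise_cons.mp h with ⟨hy, hys⟩
    simp only [PySem.List.insertBy]
    split_ifs with hlt
    · refine List.pairwise_cons.mpr ⟨?_, h⟩
      intro z hz
      have hlt' : PySem.Str.len y < PySem.Str.len x := by
        simp only [decide_eq_true_eq] at hlt; omega
      rcases List.mem_cons.mp hz with rfl | hz
      · omega
      · have := hy z hz; omega
    · refine List.pairwise_cons.mpr ⟨?_, ih hys⟩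
      intro z hz
      have hle : PySem.Str.len x ≤ PySem.Str.len y := by
        simp only [decide_eq_true_eq] at hlt; omega
      rcases (PySem.List.mem_insertBy _ _ _ _).mp hz with rfl | hz
      · exact hle
      · exact hy z hz

theorem firstMatch_insertBy (lower x : String) (l : List String) (h : descLen l) :
    firstMatch lower (PySem.List.insertBy
        (fun a b => decide (-(PySem.Str.len a) < -(PySem.Str.len b))) x l) =
      bestStepB lower (firstMatch lower l) x := by
  induction l with
  | nil =>
    simp only [PySem.List.insertBy, firstMatch, bestStepB]
    split_ifs with h1 h2 h2 <;> first | rfl | (exfalso; simp_all)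
  | cons y ys ih =>
    rcases List.pairwise_cons.mp h with ⟨hy, hys⟩
    simp only [PySem.List.insertBy]
    split_ifs with hlt
    · -- x inserted in front: x :: y :: ys
      have hxlen : PySem.Str.len y < PySem.Str.len x := by
        simp only [decide_eq_true_eq] at hlt; omega
      by_cases hp : x ≠ "" ∧ PySem.Str.isIn x lower = true
      · -- x matches, and it is longer than any previous match
        have hm : ∀ m ∈ firstMatch lower (y :: ys), PySem.Str.len m < PySem.Str.len x := by
          intro m hmm
          have hmm' : firstMatch lower (y :: ys) = some m := hmm
          rcases List.mem_cons.mp (firstMatch_mem hmm') with rfl | hmem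
          · exact hxlen
          · have := hy m hmem; omega
        rw [firstMatch, if_pos hp]
        unfold bestStepB
        rw [if_pos ⟨hp.1, hm, hp.2⟩]
      · -- x does not match: it is skipped on both sides
        rw [firstMatch, if_neg hp]
        unfold bestStepB
        rw [if_neg (fun hc => hp ⟨hc.1, hc.2.2⟩)]
    · -- y :: insertBy x ys
      have hxy : PySem.Str.len x ≤ PySem.Str.len y := by
        simp only [decide_eq_true_eq] at hlt; omega
      by_cases hpy : y ≠ "" ∧ PySem.Str.isIn y lower = true
      · -- y is the first match in both lists; bestStepB keeps it (len x ≤ len y)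
        rw [firstMatch, if_pos hpy, firstMatch, if_pos hpy]
        unfold bestStepB
        rw [if_neg]
        rintro ⟨-, hall, -⟩
        have := hall y rfl
        omega
      · rw [firstMatch, if_neg hpy, firstMatch, if_neg hpy]
        exact ih hys

-- fold form of the bridge, generalized over the accumulator
theorem firstMatch_foldl_insertBy (lower : String) (xs : List String) :
    ∀ acc : List String, descLen acc →
      firstMatch lower (xs.foldl (fun acc x => PySem.List.insertBy
          (fun a b => decide ((fun x => -(PySem.Str.len x)) a < (fun x => -(PySem.Str.len x)) b)) x acc) acc) =
        xs.foldl (bestStepB lower) (firstMatch lower acc) := by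
  induction xs with
  | nil => intro acc _; rfl
  | cons x rest ih =>
    intro acc hacc
    simp only [List.foldl_cons]
    rw [ih _ (insertBy_preserves_desc x acc hacc), firstMatch_insertBy lower x acc hacc]

-- main bridge: first match of the sorted list = B's best-so-far fold
theorem firstMatch_sorted (lower : String) (legal_list : List String) :
    firstMatch lower (PySem.List.sorted legal_list (fun x => -(PySem.Str.len x))) =
      legal_list.foldl (bestStepB lower) none := by
  rw [PySem.List.sorted_eq_foldl_insertBy]
  simpa using firstMatch_foldl_insertBy lower legal_list [] (by simp [descLen])

-- ===== VERDICT (by name: the statement is the Claim_ definition above) =====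
theorem parse_company_spec : Claim_equal_parse_company := by
  intro value legal_list _
  unfold Spec_parse_company parse_company parse_company_alt
  rw [parseLoopA_eq_firstMatch, firstMatch_sorted]
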